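-- pv_equiv track=rewrite | github.com/nicekim2000/CodingTest | Programmers/연습문제 최고의 집합.py | solution
-- ===== SOURCE A (Python) =====
-- def solution(n, s):
--
--     a=s//n
--     if a==0 : return [-1]
--     remain=s-(a*n)
--     result=[a for _ in range(n)]
--     last=len(result)-1
--     for i in range(remain):
--         result[last]+=1
--         last-=1
--
--     return result
-- ===== SOURCE B (Python) =====
-- def solution(n, s):
--     a = s // n
--     if a == 0:
--         return [-1]
--     return [(s + i) // n for i in range(n)]
-- ===== Notes on version B (the rewrite author's own statement) =====
-- stated objective: simpler
-- what changed: Replaces the uniform-fill list plus the backwards remainder-increment loop with a single closed-form comprehension [(s+i)//n for i in range(n)]; no mutable accumulator or second pass.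
import Mathlib
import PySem

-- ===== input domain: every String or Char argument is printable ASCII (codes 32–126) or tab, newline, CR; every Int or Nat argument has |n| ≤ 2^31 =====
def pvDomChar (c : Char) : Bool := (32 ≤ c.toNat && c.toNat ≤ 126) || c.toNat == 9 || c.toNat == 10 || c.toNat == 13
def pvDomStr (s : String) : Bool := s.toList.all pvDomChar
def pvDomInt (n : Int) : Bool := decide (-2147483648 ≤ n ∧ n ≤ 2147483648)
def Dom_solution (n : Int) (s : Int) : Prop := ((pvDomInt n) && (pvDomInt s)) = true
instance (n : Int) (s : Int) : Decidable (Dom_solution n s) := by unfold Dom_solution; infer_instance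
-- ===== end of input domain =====

-- B replaces A's uniform fill + backwards remainder-increment loop by the closed form
-- [(s+i)//n for i in range(n)] (objective: simpler, same return values).

-- ===== PORT A =====
def solution (n : Int) (s : Int) : List Int :=
  let a := PySem.Int.floordiv s n
  if a = 0 then [-1]
  else
    let remain := s - a * n
    let result := (PySem.List.pyRange 0 n 1).map (fun _ => a)
    let st := (PySem.List.pyRange 0 remain 1).foldl
      (fun (st : List Int × Int) _ =>
        let res := st.1
        let last := st.2
        -- result[last] += 1 with Python's negative-index rule (last ≥ 0 on every admitted input)
        let i := if last < 0 then last + (res.length : Int) else last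
        (res.modify i.toNat (fun x => x + 1), last - 1))
      (result, (result.length : Int) - 1)
    st.1

-- ===== PORT B =====
def solution_alt (n : Int) (s : Int) : List Int :=
  let a := PySem.Int.floordiv s n
  if a = 0 then [-1]
  else (PySem.List.pyRange 0 n 1).map (fun i => PySem.Int.floordiv (s + i) n)

-- ===== PRECONDITION & SPEC =====
-- Pre_ excludes only n = 0, where Python's s//n raises ZeroDivisionError.
def Pre_solution (n : Int) (s : Int) : Prop := n ≠ 0
instance (n : Int) (s : Int) : Decidable (Pre_solution n s) := by unfold Pre_solution; infer_instance
def pvWitness_solution : Int × Int := (3, 7)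

def Spec_solution (n : Int) (s : Int) (out : List Int) : Prop := out = solution_alt n s
instance (n : Int) (s : Int) (out : List Int) : Decidable (Spec_solution n s out) := by unfold Spec_solution; infer_instance

-- ===== CLAIM (what is proved, stated in full; the proofs are below) =====
def Claim_equal_solution : Prop := ∀ (n : Int) (s : Int), Dom_solution n s → Pre_solution n s → Spec_solution n s (solution n s)

-- ===== LEMMAS AND PROOFS =====

-- A's loop step, named for the proofs below.
def pvStep (st : List Int × Int) (_ : Int) : List Int × Int :=
  let res := st.1
  let last := st.2
  let i := if last < 0 then last + (res.length : Int) else last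
  (res.modify i.toNat (fun x => x + 1), last - 1)

theorem solution_eq_foldl (n s : Int) (h : ¬ PySem.Int.floordiv s n = 0) :
    solution n s =
      ((PySem.List.pyRange 0 (s - PySem.Int.floordiv s n * n) 1).foldl pvStep
        (((PySem.List.pyRange 0 n 1).map (fun _ => PySem.Int.floordiv s n)),
          ((((PySem.List.pyRange 0 n 1).map (fun _ => PySem.Int.floordiv s n)).length : Int) - 1))).1 := by
  simp only [solution, if_neg h]
  rfl

-- on an empty accumulator the loop keeps the list empty
theorem pvStep_nil (l : List Int) (t : Int) : (l.foldl pvStep ([], t)).1 = [] := by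
  induction l generalizing t with
  | nil => rfl
  | cons x xs ih => simpa [pvStep] using ih (t - 1)

-- loop invariant for n > 0: after m iterations the list holds a+1 on the last m slots
theorem pvLoop_inv (n a : Int) (hn : 0 < n) (m : Nat) (hm : (m : Int) < n) :
    (PySem.List.pyRange 0 (m : Int) 1).foldl pvStep
        ((PySem.List.pyRange 0 n 1).map (fun _ => a),
          (((PySem.List.pyRange 0 n 1).map (fun _ => a)).length : Int) - 1)
      = ((PySem.List.pyRange 0 n 1).map (fun j => if n - (m : Int) ≤ j then a + 1 else a),
          n - 1 - (m : Int)) := by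
  induction m with
  | zero =>
      have hnil : PySem.List.pyRange 0 ((0 : Nat) : Int) 1 = [] := by
        simp [PySem.List.pyRange_one_eq_nil (le_refl 0)]
      rw [hnil, List.foldl_nil, Prod.mk.injEq]
      refine ⟨?_, ?_⟩
      · refine List.map_congr_left ?_
        intro j hj
        rw [PySem.List.mem_pyRange_one] at hj
        rw [if_neg (show ¬ n - ((0 : Nat) : Int) ≤ j by push_cast; omega)]
      · simp [PySem.List.length_pyRange_one]
        omega
  | succ k ih =>
      have hk : (k : Int) < n := by push_cast at hm ⊢; omega
      have hsplit : PySem.List.pyRange 0 ((k : Int) + 1) 1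
          = PySem.List.pyRange 0 (k : Int) 1 ++ [(k : Int)] :=
        PySem.List.pyRange_one_succ_right (by positivity)
      rw [show ((k + 1 : Nat) : Int) = (k : Int) + 1 by push_cast; ring, hsplit,
        List.foldl_append, ih hk]
      have hlast : ¬ (n - 1 - (k : Int) < 0) := by omega
      simp only [List.foldl_cons, List.foldl_nil, pvStep, if_neg hlast]
      rw [Prod.mk.injEq]
      refine ⟨?_, ?_⟩
      · apply List.ext_getElem
        · simp
        · intro j h1 h2
          have hlen : ((PySem.List.pyRange 0 n 1).map
              (fun j => if n - (k : Int) ≤ j then a + 1 else a)).length = (n).toNat := by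
            simp [PySem.List.length_pyRange_one]
          have hj : j < n.toNat := by
            simpa [hlen] using h1
          rw [List.getElem_modify]
          have hGet : ∀ (f : Int → Int) (h' : j < ((PySem.List.pyRange 0 n 1).map f).length),
              ((PySem.List.pyRange 0 n 1).map f)[j] = f (j : Int) := by
            intro f h'
            rw [List.getElem_map, PySem.List.getElem_pyRange_one]
            simp
          rw [hGet, hGet]
          have htoNat : (n - 1 - (k : Int)).toNat = n.toNat - 1 - k := by omega
          by_cases hc : (n - 1 - (k : Int)).toNat = j
          · have hji : (j : Int) = n - 1 - (k : Int) := by omega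
            rw [if_pos hc,
              if_neg (show ¬ n - (k : Int) ≤ (j : Int) by omega),
              if_pos (show n - ((k : Int) + 1) ≤ (j : Int) by omega)]
          · have hji : (j : Int) ≠ n - 1 - (k : Int) := by
              intro hEq; apply hc; omega
            rw [if_neg hc]
            by_cases hd : n - (k : Int) ≤ (j : Int)
            · rw [if_pos hd, if_pos (show n - ((k : Int) + 1) ≤ (j : Int) by omega)]
            · rw [if_neg hd, if_neg (show ¬ n - ((k : Int) + 1) ≤ (j : Int) by omega)]
      · omega

theorem solution_spec_aux (n s : Int) (hn : n ≠ 0) : solution n s = solution_alt n s := by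
  by_cases ha : PySem.Int.floordiv s n = 0
  · simp [solution, solution_alt, ha]
  · rw [solution_eq_foldl n s ha]
    unfold solution_alt
    simp only [if_neg ha]
    rcases lt_or_gt_of_ne hn with hneg | hpos
    · -- n < 0 : both sides are the empty list
      have hnil : PySem.List.pyRange 0 n 1 = [] :=
        PySem.List.pyRange_one_eq_nil (by omega)
      rw [hnil]
      simpa using pvStep_nil _ _
    · -- n > 0
      have hmod : s - PySem.Int.floordiv s n * n = PySem.Int.mod s n := by
        have := PySem.Int.floordiv_mul_add_mod s n; omega
      have hemod : PySem.Int.mod s n = s % n := PySem.Int.mod_eq_emod_of_pos hpos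
      have h0 : 0 ≤ s % n := Int.emod_nonneg s (by omega)
      have h1 : s % n < n := Int.emod_lt_of_pos s hpos
      have hrNat : (((s % n).toNat : Nat) : Int) = s % n := Int.toNat_of_nonneg h0
      have hrange : s - PySem.Int.floordiv s n * n = (((s % n).toNat : Nat) : Int) := by
        rw [hmod, hemod, hrNat]
      rw [hrange, pvLoop_inv n (PySem.Int.floordiv s n) hpos (s % n).toNat (by omega)]
      apply List.map_congr_left
      intro j hj
      rw [PySem.List.mem_pyRange_one] at hj
      have hfd : PySem.Int.floordiv s n * n + s % n = s := by
        have h := PySem.Int.floordiv_mul_add_mod s n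
        rw [hemod] at h
        exact h
      rw [hrNat]
      by_cases hc : n - s % n ≤ j
      · rw [if_pos hc]
        symm
        rw [PySem.Int.floordiv_eq_iff_of_pos hpos]
        refine ⟨by nlinarith [hfd], by nlinarith [hfd]⟩
      · rw [if_neg hc]
        symm
        rw [PySem.Int.floordiv_eq_iff_of_pos hpos]
        refine ⟨by nlinarith [hfd], by nlinarith [hfd]⟩

-- ===== VERDICT (by name: the statement is the Claim_ definition above) =====
theorem solution_spec : Claim_equal_solution := by
  intro n s _ hpre
  exact solution_spec_aux n s hpre
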